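-- pv_equiv track=rewrite | github.com/SDGuitarist/sandbox | lead-scraper/ingest.py | _normalize_csv_headers
-- ===== SOURCE A (Python) =====
-- _CSV_FIELD_MAP = {
--     "name": "name", "Name": "name",
--     "profile_url": "profile_url", "Profile URL": "profile_url",
--     "url": "profile_url", "URL": "profile_url",
--     "bio": "bio", "Bio": "bio",
--     "location": "location", "Location": "location",
--     "email": "email", "Email": "email",
--     "website": "website", "Website": "website",
-- }
--
-- def _normalize_csv_headers(headers: list[str]) -> dict[str, str]:
--     """Map CSV headers to NormalizedLead fields. Case-insensitive, strip whitespace."""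
--     mapping = {}
--     for h in headers:
--         stripped = h.strip()
--         # Try exact match first, then case-insensitive
--         if stripped in _CSV_FIELD_MAP:
--             mapping[h] = _CSV_FIELD_MAP[stripped]
--         else:
--             for csv_key, field in _CSV_FIELD_MAP.items():
--                 if stripped.lower() == csv_key.lower():
--                     mapping[h] = field
--                     break
--     return mapping
-- ===== SOURCE B (Python) =====
-- # B: one precomputed lowercase lookup table; single pass over headers, no inner scan (faster).
-- _FIELD_BY_LOWER = {
--     "name": "name",
--     "profile_url": "profile_url",
--     "profile url": "profile_url",
--     "url": "profile_url",
--     "bio": "bio",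
--     "location": "location",
--     "email": "email",
--     "website": "website",
-- }
--
-- def _normalize_csv_headers(headers: list[str]) -> dict[str, str]:
--     mapping = {}
--     for h in headers:
--         field = _FIELD_BY_LOWER.get(h.strip().lower())
--         if field is not None:
--             mapping[h] = field
--     return mapping
-- ===== Notes on version B (the rewrite author's own statement) =====
-- stated objective: faster
-- what changed: Replaced the exact-match-then-inner-case-insensitive-scan over the 14-key map with a single precomputed lowercase lookup table consulted once per header (lowercase-colliding keys all map to the same field, so the two-tier priority is redundant).
import Mathlib
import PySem

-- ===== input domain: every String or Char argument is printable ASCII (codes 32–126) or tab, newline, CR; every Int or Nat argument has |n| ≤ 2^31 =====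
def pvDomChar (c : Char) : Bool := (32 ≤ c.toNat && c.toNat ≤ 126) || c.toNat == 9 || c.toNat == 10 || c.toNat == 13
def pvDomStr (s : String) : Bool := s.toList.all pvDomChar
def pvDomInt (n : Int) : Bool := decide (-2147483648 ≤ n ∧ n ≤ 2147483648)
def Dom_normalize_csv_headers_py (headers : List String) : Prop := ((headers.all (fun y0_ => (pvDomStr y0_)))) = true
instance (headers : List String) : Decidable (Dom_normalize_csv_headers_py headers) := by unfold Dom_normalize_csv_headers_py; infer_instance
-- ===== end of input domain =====

-- B replaces A's exact-match-then-inner-case-insensitive-scan with one precomputed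
-- lowercase lookup table consulted once per header (measurably faster; same results).

-- ===== PORT A =====
-- the module constant _CSV_FIELD_MAP (a dict literal)
def csvFieldMapL : List (String × String) :=
  [("name", "name"), ("Name", "name"),
   ("profile_url", "profile_url"), ("Profile URL", "profile_url"),
   ("url", "profile_url"), ("URL", "profile_url"),
   ("bio", "bio"), ("Bio", "bio"),
   ("location", "location"), ("Location", "location"),
   ("email", "email"), ("Email", "email"),
   ("website", "website"), ("Website", "website")]

def csvFieldMap : PySem.Dict String String := PySem.Dict.ofList csvFieldMapL

-- the inner 'for csv_key, field in _CSV_FIELD_MAP.items(): if …: mapping[h] = field; break'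
-- (first case-insensitive match wins, then break; no match leaves mapping untouched)
def pvScanA (items : List (String × String)) (stripped : String) (m : PySem.Dict String String)
    (h : String) : PySem.Dict String String :=
  match items with
  | [] => m
  | (k, v) :: rest =>
    if PySem.Str.lower stripped == PySem.Str.lower k then m.insert h v
    else pvScanA rest stripped m h

-- the body of A's outer loop
def pvStepA (m : PySem.Dict String String) (h : String) : PySem.Dict String String :=
  let stripped := PySem.Str.strip h
  match csvFieldMap.get? stripped with
  | some v => m.insert h v              -- 'if stripped in _CSV_FIELD_MAP: mapping[h] = _CSV_FIELD_MAP[stripped]'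
  | none => pvScanA csvFieldMap.items stripped m h

def normalize_csv_headers_py (headers : List String) : List (String × String) :=
  (headers.foldl pvStepA PySem.Dict.empty).items

-- ===== PORT B =====
-- the module constant _FIELD_BY_LOWER (a dict literal)
def fieldByLower : PySem.Dict String String :=
  PySem.Dict.ofList
    [("name", "name"), ("profile_url", "profile_url"), ("profile url", "profile_url"),
     ("url", "profile_url"), ("bio", "bio"), ("location", "location"),
     ("email", "email"), ("website", "website")]

-- the body of B's loop
def pvStepB (m : PySem.Dict String String) (h : String) : PySem.Dict String String :=
  match fieldByLower.get? (PySem.Str.lower (PySem.Str.strip h)) with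
  | some v => m.insert h v
  | none => m

def normalize_csv_headers_py_alt (headers : List String) : List (String × String) :=
  (headers.foldl pvStepB PySem.Dict.empty).items

-- ===== PRECONDITION & SPEC =====
def Spec_normalize_csv_headers_py (headers : List String) (out : List (String × String)) : Prop := out = normalize_csv_headers_py_alt headers
instance (headers : List String) (out : List (String × String)) : Decidable (Spec_normalize_csv_headers_py headers out) := by unfold Spec_normalize_csv_headers_py; infer_instance

-- ===== CLAIM (what is proved, stated in full; the proofs are below) =====
def Claim_equal_normalize_csv_headers_py : Prop := ∀ (headers : List String), Dom_normalize_csv_headers_py headers → Spec_normalize_csv_headers_py headers (normalize_csv_headers_py headers)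

-- ===== LEMMAS AND PROOFS =====

-- Per-header step of A equals per-header step of B, for every string.
lemma step_eq (m : PySem.Dict String String) (h : String) : pvStepA m h = pvStepB m h := by
  unfold pvStepA pvStepB
  dsimp only
  generalize PySem.Str.strip h = s
  by_cases e1 : s = "name"
  · rw [e1]; rfl
  by_cases e2 : s = "Name"
  · rw [e2]; rfl
  by_cases e3 : s = "profile_url"
  · rw [e3]; rfl
  by_cases e4 : s = "Profile URL"
  · rw [e4]; rfl
  by_cases e5 : s = "url"
  · rw [e5]; rfl
  by_cases e6 : s = "URL"
  · rw [e6]; rfl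
  by_cases e7 : s = "bio"
  · rw [e7]; rfl
  by_cases e8 : s = "Bio"
  · rw [e8]; rfl
  by_cases e9 : s = "location"
  · rw [e9]; rfl
  by_cases e10 : s = "Location"
  · rw [e10]; rfl
  by_cases e11 : s = "email"
  · rw [e11]; rfl
  by_cases e12 : s = "Email"
  · rw [e12]; rfl
  by_cases e13 : s = "website"
  · rw [e13]; rfl
  by_cases e14 : s = "Website"
  · rw [e14]; rfl
  have e1' : ¬ ("name" = s) := fun q => e1 q.symm
  have e2' : ¬ ("Name" = s) := fun q => e2 q.symm
  have e3' : ¬ ("profile_url" = s) := fun q => e3 q.symm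
  have e4' : ¬ ("Profile URL" = s) := fun q => e4 q.symm
  have e5' : ¬ ("url" = s) := fun q => e5 q.symm
  have e6' : ¬ ("URL" = s) := fun q => e6 q.symm
  have e7' : ¬ ("bio" = s) := fun q => e7 q.symm
  have e8' : ¬ ("Bio" = s) := fun q => e8 q.symm
  have e9' : ¬ ("location" = s) := fun q => e9 q.symm
  have e10' : ¬ ("Location" = s) := fun q => e10 q.symm
  have e11' : ¬ ("email" = s) := fun q => e11 q.symm
  have e12' : ¬ ("Email" = s) := fun q => e12 q.symm
  have e13' : ¬ ("website" = s) := fun q => e13 q.symm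
  have e14' : ¬ ("Website" = s) := fun q => e14 q.symm
  have hno : csvFieldMap.get? s = none := by
    rw [(by decide : csvFieldMap = PySem.Dict.mk csvFieldMapL)]
    simp [csvFieldMapL, PySem.Dict.get?, e1', e2', e3', e4', e5', e6', e7', e8', e9', e10', e11', e12', e13', e14']
  rw [hno, (by decide : csvFieldMap.items = csvFieldMapL),
      (by decide : fieldByLower = PySem.Dict.mk [("name", "name"), ("profile_url", "profile_url"), ("profile url", "profile_url"), ("url", "profile_url"), ("bio", "bio"), ("location", "location"), ("email", "email"), ("website", "website")])]
  have l0 : PySem.Str.lower "name" = "name" := by decide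
  have l1 : PySem.Str.lower "Name" = "name" := by decide
  have l2 : PySem.Str.lower "profile_url" = "profile_url" := by decide
  have l3 : PySem.Str.lower "Profile URL" = "profile url" := by decide
  have l4 : PySem.Str.lower "url" = "url" := by decide
  have l5 : PySem.Str.lower "URL" = "url" := by decide
  have l6 : PySem.Str.lower "bio" = "bio" := by decide
  have l7 : PySem.Str.lower "Bio" = "bio" := by decide
  have l8 : PySem.Str.lower "location" = "location" := by decide
  have l9 : PySem.Str.lower "Location" = "location" := by decide
  have l10 : PySem.Str.lower "email" = "email" := by decide
  have l11 : PySem.Str.lower "Email" = "email" := by decide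
  have l12 : PySem.Str.lower "website" = "website" := by decide
  have l13 : PySem.Str.lower "Website" = "website" := by decide
  by_cases f1 : PySem.Str.lower s = "name"
  · simp [pvScanA, csvFieldMapL, PySem.Dict.get?_mk_cons, l0, f1]
  by_cases f2 : PySem.Str.lower s = "profile_url"
  · simp [pvScanA, csvFieldMapL, PySem.Dict.get?_mk_cons, l0, l1, l2, f2]
  by_cases f3 : PySem.Str.lower s = "profile url"
  · simp [pvScanA, csvFieldMapL, PySem.Dict.get?_mk_cons, l0, l1, l2, l3, f3]
  by_cases f4 : PySem.Str.lower s = "url"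
  · simp [pvScanA, csvFieldMapL, PySem.Dict.get?_mk_cons, l0, l1, l2, l3, l4, f4]
  by_cases f5 : PySem.Str.lower s = "bio"
  · simp [pvScanA, csvFieldMapL, PySem.Dict.get?_mk_cons, l0, l1, l2, l3, l4, l5, l6, f5]
  by_cases f6 : PySem.Str.lower s = "location"
  · simp [pvScanA, csvFieldMapL, PySem.Dict.get?_mk_cons, l0, l1, l2, l3, l4, l5, l6, l7, l8, f6]
  by_cases f7 : PySem.Str.lower s = "email"
  · simp [pvScanA, csvFieldMapL, PySem.Dict.get?_mk_cons, l0, l1, l2, l3, l4, l5, l6, l7, l8, l9, l10, f7]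
  by_cases f8 : PySem.Str.lower s = "website"
  · simp [pvScanA, csvFieldMapL, PySem.Dict.get?_mk_cons, l0, l1, l2, l3, l4, l5, l6, l7, l8, l9, l10, l11, l12, f8]
  have f1' : ¬ ("name" = PySem.Str.lower s) := fun q => f1 q.symm
  have f2' : ¬ ("profile_url" = PySem.Str.lower s) := fun q => f2 q.symm
  have f3' : ¬ ("profile url" = PySem.Str.lower s) := fun q => f3 q.symm
  have f4' : ¬ ("url" = PySem.Str.lower s) := fun q => f4 q.symm
  have f5' : ¬ ("bio" = PySem.Str.lower s) := fun q => f5 q.symm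
  have f6' : ¬ ("location" = PySem.Str.lower s) := fun q => f6 q.symm
  have f7' : ¬ ("email" = PySem.Str.lower s) := fun q => f7 q.symm
  have f8' : ¬ ("website" = PySem.Str.lower s) := fun q => f8 q.symm
  simp [pvScanA, csvFieldMapL, PySem.Dict.get?, l0, l1, l2, l3, l4, l5, l6, l7, l8, l9, l10, l11, l12, l13, f1, f2, f3, f4, f5, f6, f7, f8, f1', f2', f3', f4', f5', f6', f7', f8']

theorem fold_eq (headers : List String) (m : PySem.Dict String String) :
    headers.foldl pvStepA m = headers.foldl pvStepB m := by
  induction headers generalizing m with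
  | nil => rw [List.foldl_nil, List.foldl_nil]
  | cons x xs ih => rw [List.foldl_cons, List.foldl_cons, step_eq]; exact ih _

-- ===== VERDICT (by name: the statement is the Claim_ definition above) =====
theorem normalize_csv_headers_py_spec : Claim_equal_normalize_csv_headers_py := by
  intro headers _
  unfold Spec_normalize_csv_headers_py normalize_csv_headers_py normalize_csv_headers_py_alt
  rw [fold_eq]
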